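-- pv_equiv track=rewrite | github.com/Nguyentudung/Backend-LTS | src/docx_parser/question_blocks.py | split_flow_into_lines
-- ===== SOURCE A (Python) =====
-- from typing import Any, Dict, Iterable, List, Tuple
--
-- def split_flow_into_lines(flow: List[Dict[str, Any]]) -> List[Tuple[List[Dict[str, Any]], str | None]]:
--     lines: List[Tuple[List[Dict[str, Any]], str | None]] = []
--     current: List[Dict[str, Any]] = []
--
--     for block in flow:
--         if isinstance(block, dict) and block.get("type") == "newline":
--             kind = block.get("kind") or "line"
--             lines.append((current, kind))
--             current = []
--             continue
--         current.append(block)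
--
--     lines.append((current, None))
--     return lines
-- ===== SOURCE B (Python) =====
-- from typing import Any, Dict, List, Optional, Tuple
--
--
-- def _first_marker(flow: List[Dict[str, Any]]) -> Optional[Tuple[int, str]]:
--     for i, block in enumerate(flow):
--         if isinstance(block, dict) and block.get("type") == "newline":
--             return i, (block.get("kind") or "line")
--     return None
--
--
-- def split_flow_into_lines(flow: List[Dict[str, Any]]) -> List[Tuple[List[Dict[str, Any]], str | None]]:
--     m = _first_marker(flow)
--     if m is None:
--         return [(list(flow), None)]
--     i, kind = m
--     return [(flow[:i], kind)] + split_flow_into_lines(flow[i + 1:])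
-- ===== Notes on version B (the rewrite author's own statement) =====
-- stated objective: alternative
-- what changed: A's single pass with a mutable 'current' accumulator is replaced by a recursive decomposition: locate the first newline marker, emit the slice before it paired with its kind, and recurse on the slice after it; no accumulator is threaded.
import Mathlib
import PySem

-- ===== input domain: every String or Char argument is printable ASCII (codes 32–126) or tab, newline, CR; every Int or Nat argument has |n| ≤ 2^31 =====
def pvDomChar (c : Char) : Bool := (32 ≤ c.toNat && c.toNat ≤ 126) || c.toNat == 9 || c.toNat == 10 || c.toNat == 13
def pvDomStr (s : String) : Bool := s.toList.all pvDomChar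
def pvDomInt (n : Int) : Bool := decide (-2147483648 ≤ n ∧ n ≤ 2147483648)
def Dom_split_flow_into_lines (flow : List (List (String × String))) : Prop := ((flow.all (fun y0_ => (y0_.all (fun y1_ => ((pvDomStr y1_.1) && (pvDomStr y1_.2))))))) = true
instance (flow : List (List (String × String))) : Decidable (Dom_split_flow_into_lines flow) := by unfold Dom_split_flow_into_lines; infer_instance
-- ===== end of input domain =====

-- B replaces A's accumulator loop by a recursive first-marker/slice decomposition; objective: alternative.


-- ===== PORT A =====

-- block.get(k): first-match lookup in the association list (exact for a Python dict).
def pvGetKey (b : List (String × String)) (k : String) : Option String :=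
  (b.find? (fun p => p.1 == k)).map (·.2)

-- isinstance(block, dict) is always true under the type convention; the predicate is the get-check.
def pvIsNewline (b : List (String × String)) : Bool :=
  pvGetKey b "type" == some "newline"

-- block.get("kind") or "line": None and "" are falsy in Python.
def pvKindOf (b : List (String × String)) : String :=
  match pvGetKey b "kind" with
  | some s => if s == "" then "line" else s
  | none => "line"

-- A's loop, step for step: state (lines, current), append on marker, else extend current.
def pvAGo : List (List (String × String)) → List (List (String × String)) →
    List ((List (List (String × String))) × Option String) →
    List ((List (List (String × String))) × Option String)
  | [], current, lines => lines ++ [(current, none)]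
  | b :: rest, current, lines =>
      if pvIsNewline b then pvAGo rest [] (lines ++ [(current, some (pvKindOf b))])
      else pvAGo rest (current ++ [b]) lines

def split_flow_into_lines (flow : List (List (String × String))) : List ((List (List (String × String))) × Option String) :=
  pvAGo flow [] []

-- ===== PORT B =====

-- _first_marker: index and kind of the first newline block, or none.
def pvFirstMarker : List (List (String × String)) → Option (Nat × String)
  | [] => none
  | b :: rest =>
      if pvIsNewline b then some (0, pvKindOf b)
      else (pvFirstMarker rest).map (fun p => (p.1 + 1, p.2))

theorem pvFirstMarker_lt {flow : List (List (String × String))} {i : Nat} {k : String}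
    (h : pvFirstMarker flow = some (i, k)) : i < flow.length := by
  induction flow generalizing i k with
  | nil => simp [pvFirstMarker] at h
  | cons b rest ih =>
    by_cases hb : pvIsNewline b
    · rw [pvFirstMarker, if_pos hb] at h
      simp at h
      simp [← h.1]
    · rw [pvFirstMarker, if_neg hb] at h
      cases hm : pvFirstMarker rest with
      | none => rw [hm] at h; simp at h
      | some p =>
        obtain ⟨j, k'⟩ := p
        rw [hm] at h
        simp at h
        have := ih hm
        simp
        omega

-- flow[:i] / flow[i+1:] with 0 ≤ i < len(flow): List.take / List.drop are exact here.
def split_flow_into_lines_alt (flow : List (List (String × String))) : List ((List (List (String × String))) × Option String) :=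
  match h : pvFirstMarker flow with
  | none => [(flow, none)]
  | some (i, kind) => (flow.take i, some kind) :: split_flow_into_lines_alt (flow.drop (i + 1))
termination_by flow.length
decreasing_by
  have := pvFirstMarker_lt h
  simp [List.length_drop]; omega

-- ===== PRECONDITION & SPEC =====
def Spec_split_flow_into_lines (flow : List (List (String × String))) (out : List ((List (List (String × String))) × Option String)) : Prop := out = split_flow_into_lines_alt flow
instance (flow : List (List (String × String))) (out : List ((List (List (String × String))) × Option String)) : Decidable (Spec_split_flow_into_lines flow out) := by unfold Spec_split_flow_into_lines; infer_instance

-- ===== CLAIM (what is proved, stated in full; the proofs are below) =====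
def Claim_equal_split_flow_into_lines : Prop := ∀ (flow : List (List (String × String))), Dom_split_flow_into_lines flow → Spec_split_flow_into_lines flow (split_flow_into_lines flow)

-- ===== LEMMAS AND PROOFS =====

theorem pvAGo_lines (flow : List (List (String × String)))
    (current : List (List (String × String)))
    (lines : List ((List (List (String × String))) × Option String)) :
    pvAGo flow current lines = lines ++ pvAGo flow current [] := by
  induction flow generalizing current lines with
  | nil => simp [pvAGo]
  | cons b rest ih =>
    by_cases hb : pvIsNewline b
    · simp only [pvAGo, hb, if_pos, List.nil_append]
      rw [ih [] (lines ++ [(current, some (pvKindOf b))]), ih [] [(current, some (pvKindOf b))]]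
      simp
    · simp only [pvAGo, hb, Bool.false_eq_true, if_false]
      exact ih _ _

-- no marker in flow: A's loop only extends current.
theorem pvAGo_none (flow : List (List (String × String)))
    (current : List (List (String × String)))
    (h : pvFirstMarker flow = none) :
    pvAGo flow current [] = [(current ++ flow, none)] := by
  induction flow generalizing current with
  | nil => simp [pvAGo]
  | cons b rest ih =>
    by_cases hb : pvIsNewline b
    · rw [pvFirstMarker, if_pos hb] at h; simp at h
    · rw [pvFirstMarker, if_neg hb] at h
      cases hm : pvFirstMarker rest with
      | none =>
        simp only [pvAGo, hb, Bool.false_eq_true, if_false]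
        rw [ih _ hm]
        simp
      | some p => rw [hm] at h; simp at h

-- first marker at index i: A's loop emits current ++ flow[:i] and restarts on flow[i+1:].
theorem pvAGo_some (flow : List (List (String × String)))
    (current : List (List (String × String))) (i : Nat) (k : String)
    (h : pvFirstMarker flow = some (i, k)) :
    pvAGo flow current [] =
      (current ++ flow.take i, some k) :: pvAGo (flow.drop (i + 1)) [] [] := by
  induction flow generalizing current i k with
  | nil => simp [pvFirstMarker] at h
  | cons b rest ih =>
    by_cases hb : pvIsNewline b
    · rw [pvFirstMarker, if_pos hb] at h
      simp at h
      obtain ⟨hi, hk⟩ := h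
      subst hi hk
      simp only [pvAGo, hb, if_pos]
      rw [pvAGo_lines]
      simp
    · rw [pvFirstMarker, if_neg hb] at h
      cases hm : pvFirstMarker rest with
      | none => rw [hm] at h; simp at h
      | some p =>
        obtain ⟨j, k'⟩ := p
        rw [hm] at h
        simp at h
        obtain ⟨hi, hk⟩ := h
        subst hk
        simp only [pvAGo, hb, Bool.false_eq_true, if_false]
        rw [ih _ _ _ hm]
        subst hi
        simp

-- A's loop equals B's recursion, for every flow.
theorem pvMain (flow : List (List (String × String))) :
    pvAGo flow [] [] = split_flow_into_lines_alt flow := by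
  induction flow using split_flow_into_lines_alt.induct with
  | case1 flow h =>
    rw [pvAGo_none _ _ h, split_flow_into_lines_alt, h]
    simp
  | case2 flow i kind h ih =>
    rw [pvAGo_some _ _ _ _ h, split_flow_into_lines_alt, h, ih]
    simp

-- ===== VERDICT (by name: the statement is the Claim_ definition above) =====
theorem split_flow_into_lines_spec : Claim_equal_split_flow_into_lines := by
  intro flow _
  unfold Spec_split_flow_into_lines split_flow_into_lines
  exact pvMain flow
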